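-- pv_equiv track=rewrite | github.com/Real1236/LeetcodePython | leetcode/editor/en/WTA/WTA 2024/achan625_session2_q3.py | count_employees_under_manager
-- ===== SOURCE A (Python) =====
-- def count_employees_under_manager(employee_manager_map: dict) -> dict:
--         direct_reports = dict()
--         for key, value in employee_manager_map.items():
--             if(key==value):
--                 continue
--             if key not in direct_reports:
--                 direct_reports[key] = []
--             if value not in direct_reports:
--                 direct_reports[value] = [key]
--             else:
--                 direct_reports[value].append(key)
--
--         count = dict()
--         for manager in direct_reports:
--             count[manager] = len(direct_reports[manager])
--             for employee in direct_reports[manager]: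
--                 count[manager] += len(direct_reports[employee])
--         return count
-- ===== SOURCE B (Python) =====
-- def count_employees_under_manager(employee_manager_map: dict) -> dict:
--     count = dict()
--     for k, m in employee_manager_map.items():
--         if k != m:
--             count.setdefault(k, 0)
--             count.setdefault(m, 0)
--     for k, m in employee_manager_map.items():
--         if k != m:
--             count[m] += 1
--             gm = employee_manager_map.get(m)
--             if gm is not None and gm != m:
--                 count[gm] += 1
--     return count
-- ===== Notes on version B (the rewrite author's own statement) =====
-- stated objective: simpler
-- what changed: B builds no adjacency lists: two flat passes over the entries keep only an integer counter, crediting each non-self entry (k,m) once to its manager m and once to m's own non-self manager looked up directly in the input map.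
import Mathlib
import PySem

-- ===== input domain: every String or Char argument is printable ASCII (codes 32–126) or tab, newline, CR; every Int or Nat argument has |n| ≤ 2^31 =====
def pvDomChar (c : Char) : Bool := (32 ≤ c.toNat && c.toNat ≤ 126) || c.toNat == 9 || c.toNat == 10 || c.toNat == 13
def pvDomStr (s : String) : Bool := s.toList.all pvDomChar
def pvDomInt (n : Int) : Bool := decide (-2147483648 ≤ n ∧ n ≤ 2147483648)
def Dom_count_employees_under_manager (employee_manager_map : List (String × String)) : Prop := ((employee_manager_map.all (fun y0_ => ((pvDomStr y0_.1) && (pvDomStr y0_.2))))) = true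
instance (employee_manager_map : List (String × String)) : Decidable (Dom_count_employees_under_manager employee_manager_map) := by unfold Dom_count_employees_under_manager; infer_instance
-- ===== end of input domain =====

-- B replaces A's adjacency-list build with two flat counting passes over the entries (simpler; same result).

-- ===== PORT A =====
-- loop body of A's first loop (building direct_reports)
def pvStepA (dr : PySem.Dict String (List String)) (kv : String × String) : PySem.Dict String (List String) :=
  if kv.1 == kv.2 then dr
  else
    let dr2 := if dr.contains kv.1 then dr else dr.insert kv.1 []
    if dr2.contains kv.2 then dr2.insert kv.2 (dr2.getD kv.2 [] ++ [kv.1])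
    else dr2.insert kv.2 [kv.1]

-- loop body of A's second loop (count per manager, with the inner loop over the direct reports)
def pvStepA2 (dr : PySem.Dict String (List String)) (c : PySem.Dict String Int) (manager : String) : PySem.Dict String Int :=
  let c := c.insert manager ((dr.getD manager []).length : Int)
  (dr.getD manager []).foldl
    (fun c employee => c.insert manager (c.getD manager 0 + ((dr.getD employee []).length : Int))) c

def count_employees_under_manager (employee_manager_map : List (String × String)) : List (String × Int) :=
  let direct_reports : PySem.Dict String (List String) :=
    employee_manager_map.foldl pvStepA PySem.Dict.empty
  let count : PySem.Dict String Int :=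
    direct_reports.keys.foldl (pvStepA2 direct_reports) PySem.Dict.empty
  count.items

-- ===== PORT B =====
-- loop body of B's first pass (register every non-self key and manager with count 0)
def pvStepB1 (c : PySem.Dict String Int) (kv : String × String) : PySem.Dict String Int :=
  if kv.1 == kv.2 then c else (c.setdefault kv.1 0).setdefault kv.2 0

-- loop body of B's second pass (dm = the input map as a dict, for employee_manager_map.get)
def pvStepB2 (dm : PySem.Dict String String) (c : PySem.Dict String Int) (kv : String × String) : PySem.Dict String Int :=
  if kv.1 == kv.2 then c
  else
    let c := c.insert kv.2 (c.getD kv.2 0 + 1)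
    match dm.get? kv.2 with
    | some gm => if gm == kv.2 then c else c.insert gm (c.getD gm 0 + 1)
    | none => c

def count_employees_under_manager_alt (employee_manager_map : List (String × String)) : List (String × Int) :=
  let count0 : PySem.Dict String Int :=
    employee_manager_map.foldl pvStepB1 PySem.Dict.empty
  let count : PySem.Dict String Int :=
    employee_manager_map.foldl (pvStepB2 (PySem.Dict.ofList employee_manager_map)) count0
  count.items

-- ===== PRECONDITION & SPEC =====
-- Pre_ excludes association lists with duplicate keys: the Python argument is a dict, which cannot
-- present duplicate keys (it collapses them before the call), so such lists have no faithful Python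
-- counterpart and the ports' behaviour on them is a modeling artefact.
def Pre_count_employees_under_manager (employee_manager_map : List (String × String)) : Prop :=
  (employee_manager_map.map Prod.fst).Nodup
instance (employee_manager_map : List (String × String)) : Decidable (Pre_count_employees_under_manager employee_manager_map) := by unfold Pre_count_employees_under_manager; infer_instance

def pvWitness_count_employees_under_manager : (List (String × String)) := [("a", "b"), ("b", "c")]

def Spec_count_employees_under_manager (employee_manager_map : List (String × String)) (out : List (String × Int)) : Prop := out = count_employees_under_manager_alt employee_manager_map
instance (employee_manager_map : List (String × String)) (out : List (String × Int)) : Decidable (Spec_count_employees_under_manager employee_manager_map out) := by unfold Spec_count_employees_under_manager; infer_instance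

-- ===== CLAIM (what is proved, stated in full; the proofs are below) =====
def Claim_equal_count_employees_under_manager : Prop := ∀ (employee_manager_map : List (String × String)), Dom_count_employees_under_manager employee_manager_map → Pre_count_employees_under_manager employee_manager_map → Spec_count_employees_under_manager employee_manager_map (count_employees_under_manager employee_manager_map)

-- ===== LEMMAS AND PROOFS =====

-- the direct-report list A associates with x: first components of non-self entries managed by x
def pvD (l : List (String × String)) (x : String) : List String :=
  (l.filter (fun p => p.1 != p.2 && p.2 == x)).map Prod.fst

-- the key order both ports produce
def pvAdd (ks : List String) (x : String) : List String := if x ∈ ks then ks else ks ++ [x]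
def pvK (ks : List String) : List (String × String) → List String
  | [] => ks
  | kv :: t => if kv.1 = kv.2 then pvK ks t else pvK (pvAdd (pvAdd ks kv.1) kv.2) t

-- per-x total contribution of B's second pass
def pvContrib (l : List (String × String)) (dm : PySem.Dict String String) (x : String) : Int :=
  (l.map (fun kv => if kv.1 = kv.2 then 0 else
    (if kv.2 = x then (1 : Int) else 0) +
    (match dm.get? kv.2 with
     | some gm => if gm = kv.2 then 0 else if gm = x then (1 : Int) else 0
     | none => 0))).sum

-- A's per-manager value expressed over the input
def pvFval (l : List (String × String)) (x : String) : Int :=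
  ((pvD l x).length : Int) + ((pvD l x).map (fun e => ((pvD l e).length : Int))).sum

theorem pv_getD_stepA (d : PySem.Dict String (List String)) (kv : String × String) (x : String) :
    (pvStepA d kv).getD x [] = d.getD x [] ++ (if kv.1 ≠ kv.2 ∧ kv.2 = x then [kv.1] else []) := by
  unfold pvStepA
  by_cases h : kv.1 = kv.2
  · simp [h]
  · have hb : (kv.1 == kv.2) = false := by simp [h]
    simp only [hb, Bool.false_eq_true, if_false]
    have hd2 : ∀ y, (if d.contains kv.1 then d else d.insert kv.1 []).getD y [] = d.getD y [] := by
      intro y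
      by_cases hc : d.contains kv.1 = true
      · simp [hc]
      · have hc' : d.contains kv.1 = false := by simpa using hc
        simp only [hc', Bool.false_eq_true, if_false]
        rw [PySem.Dict.getD_insert]
        split_ifs with hy
        · subst hy; exact (PySem.Dict.getD_of_not_contains d _ hc').symm
        · rfl
    set d2 := (if d.contains kv.1 then d else d.insert kv.1 []) with hd2def
    have key : ∀ (w : List String), d2.getD kv.2 [] = w →
        (d2.insert kv.2 (w ++ [kv.1])).getD x [] =
          d.getD x [] ++ (if kv.1 ≠ kv.2 ∧ kv.2 = x then [kv.1] else []) := by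
      intro w hw
      rw [PySem.Dict.getD_insert]
      by_cases hy : x = kv.2
      · subst hy
        simp [h, ← hw, hd2]
      · rw [if_neg hy, if_neg (by tauto), hd2, List.append_nil]
    by_cases hc2 : d2.contains kv.2 = true
    · simp only [hc2, if_true]
      exact key _ rfl
    · have hc2' : d2.contains kv.2 = false := by simpa using hc2
      simp only [hc2', Bool.false_eq_true, if_false]
      have hw : d2.getD kv.2 [] = [] := PySem.Dict.getD_of_not_contains d2 _ hc2'
      have := key [] hw
      simpa using this

theorem pvD_cons (kv : String × String) (t : List (String × String)) (x : String) :
    pvD (kv :: t) x = (if kv.1 ≠ kv.2 ∧ kv.2 = x then [kv.1] else []) ++ pvD t x := by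
  unfold pvD
  by_cases h : kv.1 ≠ kv.2 ∧ kv.2 = x
  · obtain ⟨h1, h2⟩ := h
    subst h2
    simp [List.filter_cons, h1]
  · have : ¬(kv.1 != kv.2 && kv.2 == x) = true := by
      simp only [Bool.and_eq_true, bne_iff_ne, beq_iff_eq]; exact h
    simp [List.filter_cons, this, h]

theorem pv_getD_foldA (l : List (String × String)) (d : PySem.Dict String (List String)) (x : String) :
    (l.foldl pvStepA d).getD x [] = d.getD x [] ++ pvD l x := by
  induction l generalizing d with
  | nil => simp [pvD]
  | cons kv t ih =>
    rw [List.foldl_cons, ih, pv_getD_stepA, pvD_cons, List.append_assoc]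

theorem pv_keys_insert_eq_pvAdd {ν : Type} (d : PySem.Dict String ν) (k : String) (v : ν) :
    (d.insert k v).keys = pvAdd d.keys k := by
  unfold pvAdd
  by_cases hc : d.contains k = true
  · rw [PySem.Dict.keys_insert_of_contains d v hc, if_pos ((PySem.Dict.contains_iff_mem_keys d k).mp hc)]
  · have hc' : d.contains k = false := by simpa using hc
    rw [PySem.Dict.keys_insert_of_not_contains d v hc',
      if_neg (fun hm => hc ((PySem.Dict.contains_iff_mem_keys d k).mpr hm))]

theorem pv_setdefault_eq {ν : Type} (d : PySem.Dict String ν) (k : String) (v : ν) :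
    d.setdefault k v = if d.contains k then d else d.insert k v := by
  by_cases hc : d.contains k = true
  · simp [PySem.Dict.setdefault, hc]
  · have hc' : d.contains k = false := by simpa using hc
    apply PySem.Dict.ext
    simp [PySem.Dict.setdefault, hc', PySem.Dict.items_insert_of_not_contains d v hc']

theorem pv_keys_setdefault {ν : Type} (d : PySem.Dict String ν) (k : String) (v : ν) :
    (d.setdefault k v).keys = pvAdd d.keys k := by
  rw [pv_setdefault_eq]
  by_cases hc : d.contains k = true
  · rw [if_pos hc, pvAdd, if_pos ((PySem.Dict.contains_iff_mem_keys d k).mp hc)]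
  · have hc' : d.contains k = false := by simpa using hc
    rw [if_neg (by simp [hc']), pv_keys_insert_eq_pvAdd]

theorem pv_getD_setdefault0 (d : PySem.Dict String Int) (k x : String) :
    (d.setdefault k 0).getD x 0 = d.getD x 0 := by
  rw [pv_setdefault_eq]
  by_cases hc : d.contains k = true
  · rw [if_pos hc]
  · have hc' : d.contains k = false := by simpa using hc
    rw [if_neg (by simp [hc']), PySem.Dict.getD_insert]
    split_ifs with hy
    · subst hy; exact (PySem.Dict.getD_of_not_contains d _ hc').symm
    · rfl

theorem pv_keys_stepA (d : PySem.Dict String (List String)) (kv : String × String) :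
    (pvStepA d kv).keys = if kv.1 = kv.2 then d.keys else pvAdd (pvAdd d.keys kv.1) kv.2 := by
  unfold pvStepA
  by_cases h : kv.1 = kv.2
  · simp [h]
  · have hb : (kv.1 == kv.2) = false := by simp [h]
    simp only [hb, Bool.false_eq_true, if_false, if_neg h]
    have hd2keys : (if d.contains kv.1 then d else d.insert kv.1 []).keys = pvAdd d.keys kv.1 := by
      by_cases hc : d.contains kv.1 = true
      · rw [if_pos hc, pvAdd, if_pos ((PySem.Dict.contains_iff_mem_keys d kv.1).mp hc)]
      · rw [if_neg hc, pv_keys_insert_eq_pvAdd]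
    set d2 := (if d.contains kv.1 then d else d.insert kv.1 []) with hd2def
    by_cases hc2 : d2.contains kv.2 = true
    · rw [if_pos hc2, pv_keys_insert_eq_pvAdd, hd2keys]
    · rw [if_neg hc2, pv_keys_insert_eq_pvAdd, hd2keys]

theorem pv_keys_stepB1 (c : PySem.Dict String Int) (kv : String × String) :
    (pvStepB1 c kv).keys = if kv.1 = kv.2 then c.keys else pvAdd (pvAdd c.keys kv.1) kv.2 := by
  unfold pvStepB1
  by_cases h : kv.1 = kv.2
  · simp [h]
  · have hb : (kv.1 == kv.2) = false := by simp [h]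
    simp only [hb, Bool.false_eq_true, if_false, if_neg h]
    rw [pv_keys_setdefault, pv_keys_setdefault]

theorem pv_keys_foldA (l : List (String × String)) (d : PySem.Dict String (List String)) :
    (l.foldl pvStepA d).keys = pvK d.keys l := by
  induction l generalizing d with
  | nil => rfl
  | cons kv t ih =>
    rw [List.foldl_cons, ih, pvK]
    by_cases h : kv.1 = kv.2
    · rw [if_pos h, pv_keys_stepA, if_pos h]
    · rw [if_neg h, pv_keys_stepA, if_neg h]

theorem pv_keys_foldB1 (l : List (String × String)) (c : PySem.Dict String Int) :
    (l.foldl pvStepB1 c).keys = pvK c.keys l := by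
  induction l generalizing c with
  | nil => rfl
  | cons kv t ih =>
    rw [List.foldl_cons, ih, pvK]
    by_cases h : kv.1 = kv.2
    · rw [if_pos h, pv_keys_stepB1, if_pos h]
    · rw [if_neg h, pv_keys_stepB1, if_neg h]

theorem pv_mem_pvAdd (ks : List String) (x y : String) :
    y ∈ pvAdd ks x ↔ y ∈ ks ∨ y = x := by
  unfold pvAdd
  split_ifs with h
  · constructor
    · exact Or.inl
    · rintro (hy | rfl) <;> [exact hy; exact h]
  · simp

theorem pv_nodup_pvAdd (ks : List String) (x : String) (hn : ks.Nodup) : (pvAdd ks x).Nodup := by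
  unfold pvAdd
  split_ifs with h
  · exact hn
  · simp only [List.nodup_append, List.nodup_singleton]
    refine ⟨hn, trivial, ?_⟩
    intro a ha b hb
    rcases List.mem_singleton.mp hb with rfl
    intro hax
    exact h (hax ▸ ha)

theorem pv_nodup_pvK (ks : List String) (l : List (String × String)) (hn : ks.Nodup) :
    (pvK ks l).Nodup := by
  induction l generalizing ks with
  | nil => exact hn
  | cons kv t ih =>
    rw [pvK]
    split_ifs with h
    · exact ih ks hn
    · exact ih _ (pv_nodup_pvAdd _ _ (pv_nodup_pvAdd _ _ hn))

theorem pv_mem_pvK (ks : List String) (l : List (String × String)) (x : String) :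
    x ∈ pvK ks l ↔ x ∈ ks ∨ ∃ p ∈ l, p.1 ≠ p.2 ∧ (x = p.1 ∨ x = p.2) := by
  induction l generalizing ks with
  | nil => simp [pvK]
  | cons kv t ih =>
    rw [pvK]
    split_ifs with h
    · rw [ih]
      constructor
      · rintro (hk | ⟨p, hp, hne, hx⟩)
        · exact Or.inl hk
        · exact Or.inr ⟨p, List.mem_cons_of_mem _ hp, hne, hx⟩
      · rintro (hk | ⟨p, hp, hne, hx⟩)
        · exact Or.inl hk
        · rcases List.mem_cons.mp hp with rfl | hp'
          · exact absurd h hne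
          · exact Or.inr ⟨p, hp', hne, hx⟩
    · rw [ih]
      simp only [pv_mem_pvAdd, List.mem_cons]
      constructor
      · rintro ((( hk | rfl) | rfl) | ⟨p, hp, hne, hx⟩)
        · exact Or.inl hk
        · exact Or.inr ⟨kv, Or.inl rfl, h, Or.inl rfl⟩
        · exact Or.inr ⟨kv, Or.inl rfl, h, Or.inr rfl⟩
        · exact Or.inr ⟨p, Or.inr hp, hne, hx⟩
      · rintro (hk | ⟨p, rfl | hp, hne, hx⟩)
        · exact Or.inl (Or.inl (Or.inl hk))
        · rcases hx with rfl | rfl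
          · exact Or.inl (Or.inl (Or.inr rfl))
          · exact Or.inl (Or.inr rfl)
        · exact Or.inr ⟨p, hp, hne, hx⟩

theorem pv_getD_foldB1 (l : List (String × String)) (c : PySem.Dict String Int) (x : String) :
    (l.foldl pvStepB1 c).getD x 0 = c.getD x 0 := by
  induction l generalizing c with
  | nil => rfl
  | cons kv t ih =>
    rw [List.foldl_cons, ih]
    unfold pvStepB1
    split_ifs with h
    · rfl
    · rw [pv_getD_setdefault0, pv_getD_setdefault0]

theorem pv_getD_stepB2 (dm : PySem.Dict String String) (c : PySem.Dict String Int)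
    (kv : String × String) (x : String) :
    (pvStepB2 dm c kv).getD x 0 = c.getD x 0 + (if kv.1 = kv.2 then 0 else
      (if kv.2 = x then (1 : Int) else 0) +
      (match dm.get? kv.2 with
       | some gm => if gm = kv.2 then 0 else if gm = x then (1 : Int) else 0
       | none => 0)) := by
  unfold pvStepB2
  by_cases h : kv.1 = kv.2
  · simp [h]
  · have hb : (kv.1 == kv.2) = false := by simp [h]
    simp only [hb, Bool.false_eq_true, if_false, if_neg h]
    have hc2 : ∀ y, (c.insert kv.2 (c.getD kv.2 0 + 1)).getD y 0 =
        c.getD y 0 + (if kv.2 = y then 1 else 0) := by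
      intro y
      rw [PySem.Dict.getD_insert]
      by_cases hy : y = kv.2
      · subst hy; simp
      · rw [if_neg hy, if_neg (fun hh => hy hh.symm)]; omega
    cases hg : dm.get? kv.2 with
    | none => rw [hc2]; simp
    | some gm =>
      by_cases hgm : gm = kv.2
      · have hbeq : (gm == kv.2) = true := by simp [hgm]
        simp only [hbeq, if_true, if_pos hgm, add_zero]
        rw [hc2]
      · have hbeq : (gm == kv.2) = false := by simp [hgm]
        simp only [hbeq, Bool.false_eq_true, if_false, if_neg hgm]
        rw [PySem.Dict.getD_insert]
        by_cases hx : x = gm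
        · subst hx
          rw [if_pos rfl, hc2, if_pos rfl]
          ring
        · rw [if_neg hx, hc2]
          have hz : (if gm = x then (1 : Int) else 0) = 0 := if_neg (fun hh => hx hh.symm)
          rw [hz, add_zero]

theorem pv_contrib_cons (kv : String × String) (t : List (String × String))
    (dm : PySem.Dict String String) (x : String) :
    pvContrib (kv :: t) dm x = (if kv.1 = kv.2 then 0 else
      (if kv.2 = x then (1 : Int) else 0) +
      (match dm.get? kv.2 with
       | some gm => if gm = kv.2 then 0 else if gm = x then (1 : Int) else 0
       | none => 0)) + pvContrib t dm x := by
  simp [pvContrib]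

theorem pv_getD_foldB2 (dm : PySem.Dict String String) (l : List (String × String))
    (c : PySem.Dict String Int) (x : String) :
    (l.foldl (pvStepB2 dm) c).getD x 0 = c.getD x 0 + pvContrib l dm x := by
  induction l generalizing c with
  | nil => simp [pvContrib]
  | cons kv t ih =>
    rw [List.foldl_cons, ih, pv_getD_stepB2, pv_contrib_cons]
    ring

theorem pv_keys_stepB2 (dm : PySem.Dict String String) (c : PySem.Dict String Int)
    (kv : String × String)
    (h1 : kv.1 ≠ kv.2 → kv.2 ∈ c.keys)
    (h2 : ∀ gm, kv.1 ≠ kv.2 → dm.get? kv.2 = some gm → gm ≠ kv.2 → gm ∈ c.keys) :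
    (pvStepB2 dm c kv).keys = c.keys := by
  unfold pvStepB2
  by_cases h : kv.1 = kv.2
  · simp [h]
  · have hb : (kv.1 == kv.2) = false := by simp [h]
    simp only [hb, Bool.false_eq_true, if_false]
    have hk2 : (c.insert kv.2 (c.getD kv.2 0 + 1)).keys = c.keys := by
      rw [pv_keys_insert_eq_pvAdd, pvAdd, if_pos (h1 h)]
    cases hg : dm.get? kv.2 with
    | none => exact hk2
    | some gm =>
      by_cases hgm : gm = kv.2
      · simp only [(by simp [hgm] : (gm == kv.2) = true), if_true]
        exact hk2
      · simp only [(by simp [hgm] : (gm == kv.2) = false), Bool.false_eq_true, if_false]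
        rw [pv_keys_insert_eq_pvAdd, pvAdd, hk2, if_pos (h2 gm h hg hgm)]

theorem pv_keys_foldB2 (dm : PySem.Dict String String) (l : List (String × String))
    (c : PySem.Dict String Int)
    (h : ∀ kv ∈ l, kv.1 ≠ kv.2 → kv.2 ∈ c.keys ∧
      ∀ gm, dm.get? kv.2 = some gm → gm ≠ kv.2 → gm ∈ c.keys) :
    (l.foldl (pvStepB2 dm) c).keys = c.keys := by
  induction l generalizing c with
  | nil => rfl
  | cons kv t ih =>
    rw [List.foldl_cons]
    have hstep : (pvStepB2 dm c kv).keys = c.keys :=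
      pv_keys_stepB2 dm c kv (fun hne => (h kv (List.mem_cons_self) hne).1)
        (fun gm hne hg hgm => (h kv (List.mem_cons_self) hne).2 gm hg hgm)
    rw [ih _ (fun kv' hkv' hne => by rw [hstep]; exact h kv' (List.mem_cons_of_mem _ hkv') hne), hstep]

theorem pv_getD_innerA2 (dr : PySem.Dict String (List String)) (mgr : String)
    (es : List String) (c : PySem.Dict String Int) (x : String) :
    (es.foldl (fun c employee => c.insert mgr (c.getD mgr 0 + ((dr.getD employee []).length : Int))) c).getD x 0 =
      if x = mgr then c.getD mgr 0 + (es.map (fun e => ((dr.getD e []).length : Int))).sum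
      else c.getD x 0 := by
  induction es generalizing c with
  | nil => simp; intro h; subst h; rfl
  | cons e t ih =>
    rw [List.foldl_cons, ih]
    by_cases hx : x = mgr
    · subst hx
      rw [if_pos rfl, if_pos rfl, PySem.Dict.getD_insert, if_pos rfl]
      simp; ring
    · rw [if_neg hx, if_neg hx, PySem.Dict.getD_insert, if_neg hx]

theorem pv_getD_stepA2 (dr : PySem.Dict String (List String)) (c : PySem.Dict String Int)
    (mgr x : String) :
    (pvStepA2 dr c mgr).getD x 0 =
      if x = mgr then ((dr.getD mgr []).length : Int) +
        ((dr.getD mgr []).map (fun e => ((dr.getD e []).length : Int))).sum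
      else c.getD x 0 := by
  unfold pvStepA2
  rw [pv_getD_innerA2]
  by_cases hx : x = mgr
  · subst hx
    rw [if_pos rfl, if_pos rfl, PySem.Dict.getD_insert, if_pos rfl]
  · rw [if_neg hx, if_neg hx, PySem.Dict.getD_insert, if_neg hx]

theorem pv_getD_foldA2 (dr : PySem.Dict String (List String)) (l : List (String × String))
    (hdr : ∀ y, dr.getD y [] = pvD l y)
    (ks : List String) (c : PySem.Dict String Int) (x : String) :
    (ks.foldl (pvStepA2 dr) c).getD x 0 = if x ∈ ks then pvFval l x else c.getD x 0 := by
  induction ks generalizing c with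
  | nil => simp
  | cons mgr t ih =>
    rw [List.foldl_cons, ih, pv_getD_stepA2]
    by_cases ht : x ∈ t
    · rw [if_pos ht, if_pos (List.mem_cons_of_mem _ ht)]
    · rw [if_neg ht]
      by_cases hx : x = mgr
      · subst hx
        rw [if_pos rfl, if_pos (List.mem_cons_self)]
        unfold pvFval
        rw [hdr x]
        congr 1
        apply congrArg List.sum
        apply List.map_congr_left
        intro e _
        rw [hdr e]
      · rw [if_neg hx, if_neg (by simp [hx, ht])]

theorem pv_keys_innerA2 (dr : PySem.Dict String (List String)) (mgr : String)
    (es : List String) (c : PySem.Dict String Int) (hm : mgr ∈ c.keys) :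
    (es.foldl (fun c employee => c.insert mgr (c.getD mgr 0 + ((dr.getD employee []).length : Int))) c).keys = c.keys := by
  induction es generalizing c with
  | nil => rfl
  | cons e t ih =>
    rw [List.foldl_cons]
    have hk : (c.insert mgr (c.getD mgr 0 + ((dr.getD e []).length : Int))).keys = c.keys := by
      rw [pv_keys_insert_eq_pvAdd, pvAdd, if_pos hm]
    rw [ih _ (by rw [hk]; exact hm), hk]

theorem pv_keys_stepA2 (dr : PySem.Dict String (List String)) (c : PySem.Dict String Int)
    (mgr : String) : (pvStepA2 dr c mgr).keys = pvAdd c.keys mgr := by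
  unfold pvStepA2
  rw [pv_keys_innerA2, pv_keys_insert_eq_pvAdd]
  rw [pv_keys_insert_eq_pvAdd]
  rw [pvAdd]
  split_ifs with h
  · exact h
  · simp

theorem pv_keys_foldA2 (dr : PySem.Dict String (List String)) (ks : List String)
    (c : PySem.Dict String Int) : (ks.foldl (pvStepA2 dr) c).keys = ks.foldl pvAdd c.keys := by
  induction ks generalizing c with
  | nil => rfl
  | cons mgr t ih =>
    rw [List.foldl_cons, List.foldl_cons, ih, pv_keys_stepA2]

theorem pv_foldl_pvAdd_fresh (ks : List String) (acc : List String)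
    (hdisj : ∀ x ∈ ks, x ∉ acc) (hn : ks.Nodup) : ks.foldl pvAdd acc = acc ++ ks := by
  induction ks generalizing acc with
  | nil => simp
  | cons k t ih =>
    rw [List.foldl_cons, pvAdd, if_neg (hdisj k List.mem_cons_self)]
    rw [ih (acc ++ [k])]
    · simp
    · intro x hx
      simp only [List.mem_append, List.mem_singleton]
      rintro (hmem | rfl)
      · exact hdisj x (List.mem_cons_of_mem _ hx) hmem
      · exact (List.nodup_cons.mp hn).1 hx
    · exact (List.nodup_cons.mp hn).2

theorem pv_mem_pvD (l : List (String × String)) (x e : String) :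
    e ∈ pvD l x ↔ (e, x) ∈ l ∧ e ≠ x := by
  unfold pvD
  simp only [List.mem_map, List.mem_filter, Bool.and_eq_true, bne_iff_ne, beq_iff_eq]
  constructor
  · rintro ⟨p, ⟨hp, hne, hx⟩, rfl⟩
    exact ⟨by rwa [← hx, Prod.mk.eta], by rw [← hx]; exact hne⟩
  · rintro ⟨hm, hne⟩
    exact ⟨(e, x), ⟨hm, hne, rfl⟩, rfl⟩

theorem pv_nodup_pvD (l : List (String × String)) (hn : (l.map Prod.fst).Nodup) (x : String) :
    (pvD l x).Nodup := by
  unfold pvD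
  exact hn.sublist (List.Sublist.map Prod.fst List.filter_sublist)

theorem pv_items_ofList (m : List (String × String)) (hn : (m.map Prod.fst).Nodup) :
    (PySem.Dict.ofList m).items = m := by
  have h := PySem.Dict.items_foldl_insert_fresh m Prod.fst Prod.snd PySem.Dict.empty
    (fun a _ => PySem.Dict.contains_empty a.1) hn
  have : PySem.Dict.ofList m = m.foldl (fun d a => d.insert a.1 a.2) PySem.Dict.empty := rfl
  rw [this]
  simpa using h

theorem pv_get?_ofList (m : List (String × String)) (hn : (m.map Prod.fst).Nodup)
    (k v : String) : (PySem.Dict.ofList m).get? k = some v ↔ (k, v) ∈ m := by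
  rw [PySem.Dict.get?_eq_some_iff_mem_items _ _ _ (PySem.Dict.nodup_keys_ofList m),
    pv_items_ofList m hn]

theorem pv_sum_map_add {α : Type} (l : List α) (f g : α → Int) :
    (l.map (fun a => f a + g a)).sum = (l.map f).sum + (l.map g).sum := by
  induction l with
  | nil => simp
  | cons a t ih => simp [ih]; ring

theorem pv_sum_indicator {α : Type} (l : List α) (P : α → Prop) [DecidablePred P] :
    (l.map (fun a => if P a then (1 : Int) else 0)).sum =
      ((l.filter (fun a => decide (P a))).length : Int) := by
  induction l with
  | nil => simp
  | cons a t ih =>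
    by_cases h : P a
    · simp [List.filter_cons, h, ih]; ring
    · simp [List.filter_cons, h, ih]

theorem pv_sum_mem_indicator (L : List String) (hL : L.Nodup) (y : String) :
    (L.map (fun e => if y = e then (1 : Int) else 0)).sum = if y ∈ L then 1 else 0 := by
  induction L with
  | nil => simp
  | cons e t ih =>
    rcases List.nodup_cons.mp hL with ⟨he, ht⟩
    by_cases h : y = e
    · subst h
      simp [ih ht, he]
    · simp [h, ih ht]

theorem pv_count_lemma (L : List String) (hL : L.Nodup) (l : List (String × String))
    (q : String × String → Bool) :
    (L.map (fun e => ((l.filter (fun kv => q kv && kv.2 == e)).length : Int))).sum =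
      (l.map (fun kv => if q kv = true ∧ kv.2 ∈ L then (1 : Int) else 0)).sum := by
  induction l with
  | nil => simp [List.sum_eq_zero]
  | cons kv t ih =>
    rw [List.map_cons, List.sum_cons, ← ih]
    by_cases hq : q kv = true
    · have hsplit : ∀ e : String, ((List.filter (fun kv => q kv && kv.2 == e) (kv :: t)).length : Int) =
          (if kv.2 = e then (1 : Int) else 0) + ((List.filter (fun kv => q kv && kv.2 == e) t).length : Int) := by
        intro e
        rw [List.filter_cons]
        by_cases he : kv.2 = e
        · simp [hq, he]; ring
        · simp [hq, he]
      rw [congrArg List.sum (List.map_congr_left (fun e _ => hsplit e)),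
        pv_sum_map_add, pv_sum_mem_indicator L hL]
      by_cases hm : kv.2 ∈ L
      · rw [if_pos hm, if_pos ⟨hq, hm⟩]
      · rw [if_neg hm, if_neg (fun hc => hm hc.2)]
    · have hq' : q kv = false := by simpa using hq
      have hdrop : ∀ e : String, (List.filter (fun kv => q kv && kv.2 == e) (kv :: t)) =
          List.filter (fun kv => q kv && kv.2 == e) t := by
        intro e
        rw [List.filter_cons]
        simp [hq']
      rw [congrArg List.sum (List.map_congr_left
        (fun e _ => congrArg (fun (w : List (String × String)) => ((w.length : Int))) (hdrop e))),
        if_neg (fun hc => hq hc.1)]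
      ring

theorem pv_items_eq (d d' : PySem.Dict String Int) (hk : d.keys = d'.keys)
    (hn : d.keys.Nodup) (h : ∀ k, d.getD k 0 = d'.getD k 0) : d.items = d'.items := by
  have hlen : d.items.length = d'.items.length := by
    have := congrArg List.length hk
    simpa [PySem.Dict.keys] using this
  apply List.ext_getElem hlen
  intro i h1 h2
  have hk1 : d.items[i].1 = d'.items[i].1 := by
    have := congrArg (fun ks => ks[i]?) hk
    simp only [PySem.Dict.keys, List.getElem?_map] at this
    rw [List.getElem?_eq_getElem h1, List.getElem?_eq_getElem h2] at this
    simpa using this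
  have hmem1 : d.items[i] ∈ d.items := List.getElem_mem h1
  have hmem2 : d'.items[i] ∈ d'.items := List.getElem_mem h2
  have hv1 : d.getD d.items[i].1 0 = d.items[i].2 :=
    PySem.Dict.getD_of_mem_items d (k := d.items[i].1) (v := d.items[i].2)
      (by simpa using hmem1) hn 0
  have hv2 : d'.getD d'.items[i].1 0 = d'.items[i].2 :=
    PySem.Dict.getD_of_mem_items d' (k := d'.items[i].1) (v := d'.items[i].2)
      (by simpa using hmem2) (hk ▸ hn) 0
  have : d.items[i].2 = d'.items[i].2 := by
    rw [← hv1, ← hv2, ← hk1, h]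
  exact Prod.ext hk1 this

theorem pv_fval_eq_contrib (m : List (String × String)) (hn : (m.map Prod.fst).Nodup) (x : String) :
    pvFval m x = pvContrib m (PySem.Dict.ofList m) x := by
  set dm := PySem.Dict.ofList m with hdm
  have hsplit : pvContrib m dm x =
      (m.map (fun kv => if kv.1 ≠ kv.2 ∧ kv.2 = x then (1 : Int) else 0)).sum +
      (m.map (fun kv => if kv.1 ≠ kv.2 ∧ dm.get? kv.2 = some x ∧ x ≠ kv.2 then (1 : Int) else 0)).sum := by
    rw [← pv_sum_map_add]
    unfold pvContrib
    apply congrArg List.sum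
    apply List.map_congr_left
    intro kv _
    by_cases h : kv.1 = kv.2
    · simp [h]
    · rw [if_neg h]
      congr 1
      · by_cases h2 : kv.2 = x
        · rw [if_pos h2, if_pos ⟨h, h2⟩]
        · rw [if_neg h2, if_neg (fun hc => h2 hc.2)]
      · cases hg : dm.get? kv.2 with
        | none =>
          show (0 : Int) = if kv.1 ≠ kv.2 ∧ (none : Option String) = some x ∧ x ≠ kv.2 then 1 else 0
          rw [if_neg]
          rintro ⟨-, hc, -⟩
          cases hc
        | some gm =>
          show (if gm = kv.2 then (0 : Int) else if gm = x then 1 else 0) =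
            if kv.1 ≠ kv.2 ∧ some gm = some x ∧ x ≠ kv.2 then 1 else 0
          by_cases hgm : gm = kv.2
          · rw [if_pos hgm, if_neg]
            rintro ⟨-, hsome, hne⟩
            have hx : gm = x := Option.some_inj.mp hsome
            exact hne (by rw [← hx, hgm])
          · rw [if_neg hgm]
            by_cases hgx : gm = x
            · rw [if_pos hgx, if_pos ⟨h, by rw [hgx], fun hc => hgm (hgx.trans hc)⟩]
            · rw [if_neg hgx, if_neg]
              rintro ⟨-, hsome, -⟩
              exact hgx (Option.some_inj.mp hsome)
  have hS1 : (m.map (fun kv => if kv.1 ≠ kv.2 ∧ kv.2 = x then (1 : Int) else 0)).sum =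
      ((pvD m x).length : Int) := by
    rw [pv_sum_indicator]
    unfold pvD
    rw [List.length_map]
    congr 1
    apply congrArg List.length
    apply List.filter_congr
    intro a _
    by_cases h1 : a.1 = a.2 <;> by_cases h2 : a.2 = x <;> simp [h1, h2, bne, decide_not, ← Bool.beq_eq_decide_eq]
  have hS2 : ((pvD m x).map (fun e => ((pvD m e).length : Int))).sum =
      (m.map (fun kv => if kv.1 ≠ kv.2 ∧ dm.get? kv.2 = some x ∧ x ≠ kv.2 then (1 : Int) else 0)).sum := by
    have hcount := pv_count_lemma (pvD m x) (pv_nodup_pvD m hn x) m (fun kv => kv.1 != kv.2)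
    have hlhs : ((pvD m x).map (fun e => ((pvD m e).length : Int))).sum =
        ((pvD m x).map (fun e => ((m.filter (fun kv => kv.1 != kv.2 && kv.2 == e)).length : Int))).sum := by
      apply congrArg List.sum
      apply List.map_congr_left
      intro e _
      unfold pvD
      rw [List.length_map]
    rw [hlhs, hcount]
    apply congrArg List.sum
    apply List.map_congr_left
    intro kv _
    have hiff : ((kv.1 != kv.2) = true ∧ kv.2 ∈ pvD m x) ↔
        (kv.1 ≠ kv.2 ∧ dm.get? kv.2 = some x ∧ x ≠ kv.2) := by
      rw [bne_iff_ne, pv_mem_pvD]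
      constructor
      · rintro ⟨hne, hmem, hne2⟩
        exact ⟨hne, (pv_get?_ofList m hn kv.2 x).mpr hmem, fun hc => hne2 hc.symm⟩
      · rintro ⟨hne, hget, hne2⟩
        exact ⟨hne, (pv_get?_ofList m hn kv.2 x).mp hget, fun hc => hne2 hc.symm⟩
    exact if_congr hiff rfl rfl
  rw [hsplit, hS1, ← hS2]
  rfl

theorem pv_contrib_zero (m : List (String × String)) (hn : (m.map Prod.fst).Nodup) (x : String)
    (hx : x ∉ pvK [] m) : pvContrib m (PySem.Dict.ofList m) x = 0 := by
  unfold pvContrib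
  apply List.sum_eq_zero
  intro v hv
  rcases List.mem_map.mp hv with ⟨kv, hkv, rfl⟩
  by_cases h : kv.1 = kv.2
  · rw [if_pos h]
  · rw [if_neg h]
    have h1 : ¬ kv.2 = x := by
      intro hc
      exact hx ((pv_mem_pvK [] m x).mpr (Or.inr ⟨kv, hkv, h, Or.inr hc.symm⟩))
    rw [if_neg h1]
    cases hg : (PySem.Dict.ofList m).get? kv.2 with
    | none => simp
    | some gm =>
      show (0 : Int) + (if gm = kv.2 then (0 : Int) else if gm = x then 1 else 0) = 0
      by_cases hgm : gm = kv.2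
      · simp [hgm]
      · rw [if_neg hgm]
        have h2 : ¬ gm = x := by
          intro hc
          have hmem : (kv.2, gm) ∈ m := (pv_get?_ofList m hn kv.2 gm).mp hg
          exact hx ((pv_mem_pvK [] m x).mpr
            (Or.inr ⟨(kv.2, gm), hmem, fun hcc => hgm hcc.symm, Or.inr hc.symm⟩))
        rw [if_neg h2]
        ring

-- ===== VERDICT (by name: the statement is the Claim_ definition above) =====
theorem count_employees_under_manager_spec : Claim_equal_count_employees_under_manager := by
  intro m _hdom hpre
  unfold Spec_count_employees_under_manager
  show count_employees_under_manager m = count_employees_under_manager_alt m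
  unfold count_employees_under_manager count_employees_under_manager_alt
  have hpre' : (m.map Prod.fst).Nodup := hpre
  have hdr : ∀ y, (m.foldl pvStepA PySem.Dict.empty).getD y [] = pvD m y := by
    intro y
    rw [pv_getD_foldA, PySem.Dict.getD_empty, List.nil_append]
  have hkeysA : (m.foldl pvStepA PySem.Dict.empty).keys = pvK [] m := by
    rw [pv_keys_foldA, PySem.Dict.keys_empty]
  have hnodupK : (pvK ([] : List String) m).Nodup := pv_nodup_pvK [] m List.nodup_nil
  have hkeysB1 : (m.foldl pvStepB1 PySem.Dict.empty).keys = pvK [] m := by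
    rw [pv_keys_foldB1, PySem.Dict.keys_empty]
  apply pv_items_eq
  · -- keys agree
    rw [pv_keys_foldA2, hkeysA, PySem.Dict.keys_empty,
      pv_foldl_pvAdd_fresh _ _ (fun x _ hx => (List.not_mem_nil).elim hx) hnodupK,
      List.nil_append]
    rw [pv_keys_foldB2]
    · rw [hkeysB1]
    · intro kv hkv hne
      constructor
      · rw [hkeysB1]
        exact (pv_mem_pvK [] m kv.2).mpr (Or.inr ⟨kv, hkv, hne, Or.inr rfl⟩)
      · intro gm hget hgm
        rw [hkeysB1]
        have hmem : (kv.2, gm) ∈ m := (pv_get?_ofList m hpre' kv.2 gm).mp hget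
        exact (pv_mem_pvK [] m gm).mpr
          (Or.inr ⟨(kv.2, gm), hmem, fun hc => hgm hc.symm, Or.inr rfl⟩)
  · -- keys of A's count dict are Nodup
    rw [pv_keys_foldA2, hkeysA, PySem.Dict.keys_empty,
      pv_foldl_pvAdd_fresh _ _ (fun x _ hx => (List.not_mem_nil).elim hx) hnodupK,
      List.nil_append]
    exact hnodupK
  · -- values agree
    intro k
    rw [pv_getD_foldA2 _ m hdr, pv_getD_foldB2, pv_getD_foldB1, PySem.Dict.getD_empty, hkeysA]
    by_cases hk : k ∈ pvK [] m
    · rw [if_pos hk, pv_fval_eq_contrib m hpre' k, zero_add]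
    · rw [if_neg hk, pv_contrib_zero m hpre' k hk, add_zero]
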